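-- pv_equiv track=rewrite | github.com/Salmon-Dilicious/Test.Java | Greedy DP.py | adjacent_greedy
-- ===== SOURCE A (Python) =====
-- def adjacent_greedy(weights):
--     arr = weights[:]
--     total_cost = 0
--
--     while len(arr) > 1:
--         min_sum = float('inf')
--         min_idx = -1
--         for i in range(len(arr) - 1):
--             if arr[i] + arr[i+1] < min_sum:
--                 min_sum = arr[i] + arr[i+1]
--                 min_idx = i
--
--         total_cost += min_sum
--         arr[min_idx] = min_sum
--         del arr[min_idx + 1]
--
--     return total_cost
-- ===== SOURCE B (Python) =====
-- def adjacent_greedy(weights):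
--     def go(arr):
--         if len(arr) < 2:
--             return 0
--         sums = [x + y for x, y in zip(arr, arr[1:])]
--         best = min(sums)
--         i = sums.index(best)
--         return best + go(arr[:i] + [best] + arr[i + 2:])
--     return go(list(weights))
-- ===== Notes on version B (the rewrite author's own statement) =====
-- stated objective: idiomatic
-- what changed: The in-place while loop with an index scan and sentinel-initialised running minimum is replaced by a recursion that builds the adjacent-sum list once per round with zip, takes min/index, and splices by slicing; same greedy, different decomposition.
import Mathlib
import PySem

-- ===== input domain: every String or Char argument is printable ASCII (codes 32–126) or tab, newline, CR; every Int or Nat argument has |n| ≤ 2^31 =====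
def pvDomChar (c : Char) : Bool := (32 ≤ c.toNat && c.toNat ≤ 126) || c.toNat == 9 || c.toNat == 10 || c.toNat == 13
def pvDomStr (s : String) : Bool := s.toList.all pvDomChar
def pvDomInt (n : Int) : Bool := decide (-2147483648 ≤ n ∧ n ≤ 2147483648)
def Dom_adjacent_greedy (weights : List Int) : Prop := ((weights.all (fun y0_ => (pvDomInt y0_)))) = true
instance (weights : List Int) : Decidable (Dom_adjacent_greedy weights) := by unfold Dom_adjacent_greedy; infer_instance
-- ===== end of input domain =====

-- B replaces A's in-place while loop (index scan with an inf sentinel, assignment + del) by a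
-- recursion over zip-built adjacent sums with min/index and slice splicing; same greedy, same cost.

-- ===== PORT A =====
-- the inner 'for i in range(len(arr)-1)' scan; state = (min_sum : Option Int (none = float('inf')), min_idx)
def agScan (arr : List Int) : Option Int × Int :=
  (PySem.List.pyRange 0 ((arr.length : Int) - 1)).foldl
    (fun st i =>
      match st.1 with
      | none => (some (PySem.List.pyGetD arr i 0 + PySem.List.pyGetD arr (i + 1) 0), i)
      | some m =>
          if PySem.List.pyGetD arr i 0 + PySem.List.pyGetD arr (i + 1) 0 < m then
            (some (PySem.List.pyGetD arr i 0 + PySem.List.pyGetD arr (i + 1) 0), i)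
          else st)
    (none, -1)

-- one iteration of the while body: total_cost += min_sum; arr[min_idx] = min_sum; del arr[min_idx+1]
def agStep (arr : List Int) (cost : Int) : List Int × Int :=
  match agScan arr with
  | (some m, idx) =>
      let arr1 := PySem.List.pySetD arr idx m
      let arr2 := match PySem.List.pop? arr1 (idx + 1) with
                  | some r => r.2
                  | none => arr1
      (arr2, cost + m)
  | (none, _) => (arr, cost)

-- the while loop; fuel = initial length (each iteration deletes one element)
def agLoop : Nat → List Int → Int → Int
  | 0, _, cost => cost
  | Nat.succ f, arr, cost =>
      if arr.length > 1 then
        let p := agStep arr cost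
        agLoop f p.1 p.2
      else cost

def adjacent_greedy (weights : List Int) : Int :=
  agLoop weights.length weights 0

-- ===== PORT B =====
-- go(arr): sums = [x+y for x,y in zip(arr, arr[1:])], best = min(sums), i = sums.index(best),
-- recurse on arr[:i] + [best] + arr[i+2:]; fuel = length (each call shortens arr by one)
def agGo : Nat → List Int → Int
  | 0, _ => 0
  | Nat.succ f, arr =>
      if arr.length < 2 then 0
      else
        let sums := (arr.zip (PySem.List.slice arr (some 1) none)).map (fun p => p.1 + p.2)
        match PySem.List.min? sums (fun x => x) with
        | none => 0
        | some best =>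
            match PySem.List.index? sums best with
            | none => 0
            | some i =>
                best + agGo f (PySem.List.slice arr none (some (i : Int)) ++
                  best :: PySem.List.slice arr (some ((i : Int) + 2)) none)

def adjacent_greedy_alt (weights : List Int) : Int :=
  agGo weights.length weights

-- ===== PRECONDITION & SPEC =====
def Spec_adjacent_greedy (weights : List Int) (out : Int) : Prop := out = adjacent_greedy_alt weights
instance (weights : List Int) (out : Int) : Decidable (Spec_adjacent_greedy weights out) := by unfold Spec_adjacent_greedy; infer_instance

-- ===== CLAIM (what is proved, stated in full; the proofs are below) =====
def Claim_equal_adjacent_greedy : Prop := ∀ (weights : List Int), Dom_adjacent_greedy weights → Spec_adjacent_greedy weights (adjacent_greedy weights)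

-- ===== LEMMAS AND PROOFS =====

-- the A-scan fold body, abstracted over an enumerated element
def agBody (st : Option Int × Int) (p : Int × Int) : Option Int × Int :=
  match st.1 with
  | none => (some p.2, p.1)
  | some m => if p.2 < m then (some p.2, p.1) else st

-- abstract argmin recursion (running minimum m at index k; pos = index of the next element)
def agArgmin : List Int → Int → Int → Int → Int × Int
  | [], m, k, _ => (m, k)
  | x :: t, m, k, pos => if x < m then agArgmin t x pos (pos + 1) else agArgmin t m k (pos + 1)

theorem agArgmin_spec (t : List Int) : ∀ (x p pos : Int),
    agArgmin t x p pos =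
      if List.foldl min x t < x then (List.foldl min x t, pos + (t.idxOf (List.foldl min x t) : Int))
      else (x, p) := by
  induction t with
  | nil => intro x p pos; simp [agArgmin]
  | cons y t ih =>
    intro x p pos
    have hmin := (PySem.List.foldl_min_le t (min x y)).1
    by_cases hyx : y < x
    · simp only [agArgmin, if_pos hyx, List.foldl_cons]
      rw [min_eq_right hyx.le] at hmin ⊢
      rw [ih y pos (pos + 1)]
      by_cases h2 : List.foldl min y t < y
      · have hne : List.foldl min y t ≠ y := by omega
        rw [if_pos h2, if_pos (by omega), List.idxOf_cons_ne _ (Ne.symm hne)]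
        refine Prod.ext rfl ?_
        simp only [Nat.succ_eq_add_one]
        push_cast
        ring
      · have he : List.foldl min y t = y := le_antisymm hmin (not_lt.mp h2)
        rw [if_neg h2, he, if_pos hyx, List.idxOf_cons_self]
        simp
    · simp only [agArgmin, if_neg hyx, List.foldl_cons]
      rw [min_eq_left (not_lt.mp hyx)] at hmin ⊢
      rw [ih x p (pos + 1)]
      by_cases h2 : List.foldl min x t < x
      · have hne : List.foldl min x t ≠ y := by omega
        rw [if_pos h2, if_pos h2, List.idxOf_cons_ne _ (Ne.symm hne)]
        refine Prod.ext rfl ?_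
        simp only [Nat.succ_eq_add_one]
        push_cast
        ring
      · rw [if_neg h2, if_neg h2]

-- the A-scan fold over an enumerated list, from a proper state, is agArgmin
theorem agFold_enumerate (l : List Int) : ∀ (m k pos : Int),
    (PySem.List.enumerate l pos).foldl agBody (some m, k)
      = (some (agArgmin l m k pos).1, (agArgmin l m k pos).2) := by
  induction l with
  | nil => intro m k pos; simp [agArgmin, PySem.List.enumerate_nil]
  | cons x t ih =>
    intro m k pos
    rw [PySem.List.enumerate_cons, List.foldl_cons]
    by_cases h : x < m
    · simp only [agBody, agArgmin, if_pos h, ih]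
    · simp only [agBody, agArgmin, if_neg h, ih]

theorem idxOf?_of_mem (l : List Int) (v : Int) (h : v ∈ l) :
    List.idxOf? v l = some (l.idxOf v) := by
  induction l with
  | nil => simp at h
  | cons x t ih =>
    by_cases hx : x = v
    · subst hx; simp [List.idxOf?_cons, List.idxOf_cons_self]
    · rcases List.mem_cons.mp h with h1 | h1
      · exact absurd h1.symm hx
      · simp [List.idxOf?_cons, hx, ih h1, List.idxOf_cons_ne _ (by exact hx),
          Nat.succ_eq_add_one]

-- sums[j] = arr[j] + arr[j+1]
theorem sums_getElem (arr : List Int) (j : Nat)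
    (h1 : j < arr.length) (h2 : j + 1 < arr.length) :
    ((arr.zip arr.tail).map (fun p : Int × Int => p.1 + p.2))[j]'(by
        simp [List.length_zip, List.length_tail]; omega) =
      arr[j] + arr[j + 1] := by
  have hz : j < (arr.zip arr.tail).length := by simp [List.length_zip, List.length_tail]; omega
  simp [List.getElem_zip, List.getElem_tail]

-- splicing: set then delete-next is take ++ new :: drop
theorem set_eraseIdx_splice (arr : List Int) (i : Nat) (v : Int) (h : i + 1 < arr.length) :
    (arr.set i v).eraseIdx (i + 1) = arr.take i ++ v :: arr.drop (i + 2) := by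
  induction i generalizing arr with
  | zero =>
    match arr, h with
    | a :: b :: t, _ => simp [List.set_cons_zero, List.eraseIdx]
  | succ i ih =>
    match arr, h with
    | a :: t, h =>
      have ht : i + 1 < t.length := by simp at h; omega
      simp only [List.set_cons_succ, List.eraseIdx_cons_succ, List.take_succ_cons,
        List.drop_succ_cons, List.cons_append, List.cons.injEq, true_and]
      exact ih t ht

-- characterisation of one round, for len(arr) ≥ 2
theorem agStep_eq (arr : List Int) (cost : Int) (h2 : 2 ≤ arr.length) :
    ∃ (best : Int) (i : Nat),
      PySem.List.min? ((arr.zip arr.tail).map (fun p : Int × Int => p.1 + p.2)) (fun x => x) = some best ∧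
      PySem.List.index? ((arr.zip arr.tail).map (fun p : Int × Int => p.1 + p.2)) best = some i ∧
      i + 1 < arr.length ∧
      agStep arr cost = (arr.take i ++ best :: arr.drop (i + 2), cost + best) := by
  set sums := (arr.zip arr.tail).map (fun p : Int × Int => p.1 + p.2) with hsums
  clear_value sums
  have hlen : sums.length = arr.length - 1 := by
    simp [hsums, List.length_zip, List.length_tail]
  obtain ⟨s0, rest, hcons⟩ : ∃ s0 rest, sums = s0 :: rest := by
    cases hs : sums with
    | nil => rw [hs] at hlen; simp at hlen; omega
    | cons a b => exact ⟨a, b, rfl⟩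
  set best := List.foldl min s0 rest with hbest
  have hmin : PySem.List.min? sums (fun x => x) = some best := by
    rw [hcons]; exact PySem.List.min?_id_cons s0 rest
  have hbmem : best ∈ sums := by
    rw [hcons]
    rcases PySem.List.foldl_min_mem rest s0 with h | h
    · rw [hbest, h]; exact List.mem_cons_self
    · exact List.mem_cons_of_mem _ h
  have hidx : PySem.List.index? sums best = some (sums.idxOf best) := by
    rw [PySem.List.index?_eq_idxOf?]; exact idxOf?_of_mem sums best hbmem
  have hiarr : sums.idxOf best + 1 < arr.length := by
    have := List.idxOf_lt_length_iff.mpr hbmem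
    omega
  refine ⟨best, sums.idxOf best, hmin, hidx, hiarr, ?_⟩
  have hscan : agScan arr = (some best, ((sums.idxOf best : Nat) : Int)) := by
    have hb := (PySem.List.foldl_min_le rest s0).1
    unfold agScan
    have hlenI : ((arr.length : Int) - 1) = PySem.List.len sums := by
      simp only [PySem.List.len_eq, hlen]
      rw [Nat.cast_sub (by omega : 1 ≤ arr.length)]
      norm_num
    rw [hlenI]
    have hcg : (PySem.List.pyRange 0 (PySem.List.len sums)).foldl
        (fun st i =>
          match st.1 with
          | none => (some (PySem.List.pyGetD arr i 0 + PySem.List.pyGetD arr (i + 1) 0), i)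
          | some m =>
              if PySem.List.pyGetD arr i 0 + PySem.List.pyGetD arr (i + 1) 0 < m then
                (some (PySem.List.pyGetD arr i 0 + PySem.List.pyGetD arr (i + 1) 0), i)
              else st)
        ((none : Option Int), (-1 : Int))
        = (PySem.List.pyRange 0 (PySem.List.len sums)).foldl
            (fun st j => agBody st (j, PySem.List.pyGetD sums j 0)) (none, -1) := by
      apply PySem.List.foldl_congr_mem
      intro acc x hx
      obtain ⟨hx0, hx1⟩ := PySem.List.mem_pyRange_one.mp hx
      have hxlt : x < (sums.length : Int) := by
        simpa [PySem.List.len] using hx1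
      have hge : PySem.List.pyGetD arr x 0 + PySem.List.pyGetD arr (x + 1) 0
          = PySem.List.pyGetD sums x 0 := by
        have hxa : x.toNat < arr.length := by omega
        have hxa1 : x.toNat + 1 < arr.length := by omega
        rw [PySem.List.pyGetD_eq_getElem sums 0 hx0 (by omega),
          PySem.List.pyGetD_eq_getElem arr 0 hx0 (by omega),
          PySem.List.pyGetD_eq_getElem arr 0 (by omega) (by omega)]
        have hx1toNat : (x + 1).toNat = x.toNat + 1 := by omega
        simp only [hx1toNat, hsums]
        exact (sums_getElem arr x.toNat hxa hxa1).symm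
      rw [hge]
      rfl
    rw [hcg, ← List.foldl_map, ← PySem.List.enumerate_eq_map_pyRange sums 0]
    rw [hcons, PySem.List.enumerate_cons, List.foldl_cons]
    have hfirst : agBody ((none : Option Int), (-1 : Int)) (0, s0) = (some s0, 0) := rfl
    rw [hfirst, agFold_enumerate rest s0 0 (0 + 1), agArgmin_spec rest s0 0 (0 + 1)]
    by_cases hlt : best < s0
    · rw [← hbest, if_pos hlt]
      have hne : s0 ≠ best := by omega
      rw [List.idxOf_cons_ne _ hne]
      refine Prod.ext rfl ?_
      simp only [Nat.succ_eq_add_one]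
      push_cast
      ring
    · rw [← hbest, if_neg hlt]
      have he : best = s0 := le_antisymm hb (not_lt.mp hlt)
      rw [he, List.idxOf_cons_self]
      simp
  have hset : PySem.List.pySetD arr ((sums.idxOf best : Nat) : Int) best
      = arr.set (sums.idxOf best) best := PySem.List.pySetD_natCast arr _ best
  have hcast : (((sums.idxOf best : Nat) : Int) + 1) = (((sums.idxOf best + 1 : Nat)) : Int) := by
    push_cast; ring
  have hpop : PySem.List.pop? (arr.set (sums.idxOf best) best)
      (((sums.idxOf best + 1 : Nat)) : Int)
      = some ((arr.set (sums.idxOf best) best)[sums.idxOf best + 1]'(by simpa using hiarr),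
          (arr.set (sums.idxOf best) best).eraseIdx (sums.idxOf best + 1)) :=
    PySem.List.pop?_natCast _ _ (by simpa using hiarr)
  simp only [agStep, hscan, hset, hcast, hpop]
  rw [set_eraseIdx_splice arr (sums.idxOf best) best hiarr]


-- the loops agree: agLoop f arr cost = cost + agGo f arr whenever fuel covers the length
theorem agLoop_eq_agGo : ∀ (f : Nat) (arr : List Int) (cost : Int),
    arr.length ≤ f → agLoop f arr cost = cost + agGo f arr := by
  intro f
  induction f with
  | zero => intro arr cost _; simp [agLoop, agGo]
  | succ f ih =>
    intro arr cost hf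
    by_cases h : 1 < arr.length
    · obtain ⟨best, i, hmin, hidx, hi, hstep⟩ := agStep_eq arr cost (by omega)
      have hgo : agGo (Nat.succ f) arr =
          best + agGo f (arr.take i ++ best :: arr.drop (i + 2)) := by
        show (if arr.length < 2 then (0:Int) else _) = _
        rw [if_neg (by omega)]
        simp only [PySem.List.slice_from_one, hmin, hidx]
        have hito : ((i : Int) + 2) = ((i + 2 : Nat) : Int) := by push_cast; ring
        rw [PySem.List.slice_to_natCast, hito,
          PySem.List.slice_from arr (by positivity), Int.toNat_natCast]
      have hlen : (arr.take i ++ best :: arr.drop (i + 2)).length = arr.length - 1 := by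
        simp [List.length_append, List.length_take, List.length_drop]
        omega
      have hloop : agLoop (Nat.succ f) arr cost =
          agLoop f (arr.take i ++ best :: arr.drop (i + 2)) (cost + best) := by
        show (if arr.length > 1 then _ else cost) = _
        rw [if_pos h]
        simp only [hstep]
      rw [hloop, ih _ _ (by omega), hgo, add_assoc]
    · have h1 : agLoop (Nat.succ f) arr cost = cost := by
        show (if arr.length > 1 then _ else cost) = cost
        rw [if_neg h]
      have h2 : agGo (Nat.succ f) arr = 0 := by
        show (if arr.length < 2 then (0:Int) else _) = 0
        rw [if_pos (by omega)]
      rw [h1, h2, add_zero]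

-- ===== VERDICT (by name: the statement is the Claim_ definition above) =====
theorem adjacent_greedy_spec : Claim_equal_adjacent_greedy := by
  intro weights _
  show adjacent_greedy weights = adjacent_greedy_alt weights
  unfold adjacent_greedy adjacent_greedy_alt
  rw [agLoop_eq_agGo weights.length weights 0 le_rfl, zero_add]
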